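-- pv_equiv track=rewrite | github.com/jeiwils/RAG_lab | src/ontology/acord_near_miss_graph.py | _filter_unknown
-- ===== SOURCE A (Python) =====
-- from typing import Any, Dict, Iterable, List, Set, Tuple
--
-- def _filter_unknown(
--     mapping: Dict[str, Set[str]], known: Set[str]
-- ) -> Tuple[Dict[str, Set[str]], Set[str]]:
--     unknown: set[str] = set()
--     filtered: Dict[str, Set[str]] = {}
--     for qid, targets in mapping.items():
--         if qid not in known:
--             unknown.add(qid)
--             continue
--         kept = {t for t in targets if t in known}
--         unknown.update({t for t in targets if t not in known})
--         if kept: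
--             filtered[qid] = kept
--     return filtered, unknown
-- ===== SOURCE B (Python) =====
-- def _filter_unknown(mapping, known):
--     # Pass 1: collect every unknown name as one flattened stream, deduped once at the end.
--     stream = []
--     for qid, targets in mapping.items():
--         if qid in known:
--             stream.extend(t for t in targets if t not in known)
--         else:
--             stream.append(qid)
--     unknown = set(stream)
--     # Pass 2: unknown holds exactly the non-known names seen, so each kept set is a
--     # set-difference against unknown — no per-target test against known here.
--     filtered = {}
--     for qid, targets in mapping.items():
--         if qid in known:
--             kept = set(targets) - unknown
--             if kept:
--                 filtered[qid] = kept
--     return filtered, unknown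
-- ===== Notes on version B (the rewrite author's own statement) =====
-- stated objective: alternative
-- what changed: Restructures the computation into two staged passes: pass 1 flattens all unknown names (non-known qids and non-known targets of known qids) into one stream deduped once into the unknown set; pass 2 derives each kept set by set-difference against that unknown set, exploiting that unknown is disjoint from known, so no target is ever tested against known when building filtered.
import Mathlib
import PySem

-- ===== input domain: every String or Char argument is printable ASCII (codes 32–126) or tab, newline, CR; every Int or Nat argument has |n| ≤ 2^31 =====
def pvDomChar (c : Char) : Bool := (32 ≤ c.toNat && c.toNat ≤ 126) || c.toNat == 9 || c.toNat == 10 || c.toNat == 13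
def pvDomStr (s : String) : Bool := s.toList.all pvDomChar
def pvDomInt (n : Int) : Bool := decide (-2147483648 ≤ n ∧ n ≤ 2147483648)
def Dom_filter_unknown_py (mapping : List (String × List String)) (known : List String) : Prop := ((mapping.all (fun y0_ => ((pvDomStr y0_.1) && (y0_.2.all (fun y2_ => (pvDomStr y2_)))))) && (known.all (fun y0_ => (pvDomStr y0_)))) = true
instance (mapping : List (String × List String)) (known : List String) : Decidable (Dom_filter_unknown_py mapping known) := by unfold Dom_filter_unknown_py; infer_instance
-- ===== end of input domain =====

-- B computes unknown first from a flattened stream deduped once, then derives filtered by set-difference against unknown (two staged passes); alternative decomposition, same cost.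


-- ===== PORT A =====
-- for qid, targets in mapping.items(): if qid not in known: unknown.add(qid); continue;
-- kept/unknown via two set comprehensions; if kept: filtered[qid] = kept
def filter_unknown_py (mapping : List (String × List String)) (known : List String) : (List (String × List String)) × List String :=
  let fu := mapping.foldl (fun (acc : (PySem.Dict String (List String)) × List String) p =>
    if !(known.contains p.1) then
      (acc.1, PySem.Set.add acc.2 p.1)
    else
      let kept := PySem.Set.ofList (p.2.filter (fun t => known.contains t))
      let unknown := PySem.Set.update acc.2 (PySem.Set.ofList (p.2.filter (fun t => !(known.contains t))))
      let filtered := if kept ≠ [] then PySem.Dict.insert acc.1 p.1 kept else acc.1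
      (filtered, unknown)) ((PySem.Dict.mk [] : PySem.Dict String (List String)), ([] : List String))
  (fu.1.items, fu.2)

-- ===== PORT B =====
-- pass 1: stream.extend(filter) / stream.append(qid); unknown = set(stream)
-- pass 2: kept = set(targets) - unknown; if kept: filtered[qid] = kept
def filter_unknown_py_alt (mapping : List (String × List String)) (known : List String) : (List (String × List String)) × List String :=
  let stream := mapping.foldl (fun (s : List String) p =>
    if known.contains p.1 then s ++ p.2.filter (fun t => !(known.contains t))
    else s ++ [p.1]) []
  let unknown := PySem.Set.ofList stream
  let filtered := mapping.foldl (fun (f : PySem.Dict String (List String)) p =>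
    if known.contains p.1 then
      let kept := PySem.Set.diff (PySem.Set.ofList p.2) unknown
      if kept ≠ [] then PySem.Dict.insert f p.1 kept else f
    else f) (PySem.Dict.mk [] : PySem.Dict String (List String))
  (filtered.items, unknown)

-- ===== PRECONDITION & SPEC =====
def Spec_filter_unknown_py (mapping : List (String × List String)) (known : List String) (out : (List (String × List String)) × List String) : Prop := out = filter_unknown_py_alt mapping known
instance (mapping : List (String × List String)) (known : List String) (out : (List (String × List String)) × List String) : Decidable (Spec_filter_unknown_py mapping known out) := by unfold Spec_filter_unknown_py; infer_instance

-- ===== CLAIM (what is proved, stated in full; the proofs are below) =====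
def Claim_equal_filter_unknown_py : Prop := ∀ (mapping : List (String × List String)) (known : List String), Dom_filter_unknown_py mapping known → Spec_filter_unknown_py mapping known (filter_unknown_py mapping known)

-- ===== LEMMAS AND PROOFS =====

-- the per-item contribution to the unknown stream
def unkContrib (known : List String) (p : String × List String) : List String :=
  if known.contains p.1 then p.2.filter (fun t => !(known.contains t)) else [p.1]

theorem update_ofList {α : Type} [BEq α] [LawfulBEq α] (s : PySem.Set α) (l : List α) :
    PySem.Set.update s (PySem.Set.ofList l) = PySem.Set.update s l := by
  rw [PySem.Set.update_eq_append_filter, PySem.Set.update_eq_append_filter, PySem.Set.ofList_ofList]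

-- A's per-item unknown step is Set.update by the item's contribution
theorem stepu_eq (known : List String) (u : List String) (p : String × List String) :
    (if !(known.contains p.1) then PySem.Set.add u p.1
     else PySem.Set.update u (PySem.Set.ofList (p.2.filter (fun t => !(known.contains t)))))
    = PySem.Set.update u (unkContrib known p) := by
  unfold unkContrib
  cases h : known.contains p.1 with
  | false =>
    rw [if_pos (by simp), if_neg (by simp), PySem.Set.update_cons, PySem.Set.update_nil]
  | true =>
    rw [if_neg (by simp), if_pos (by simp), update_ofList]

-- A's unknown accumulator fold is Set.update by the flattened contribution stream
theorem unkA_eq_update (known : List String) (l : List (String × List String)) (u : List String) :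
    l.foldl (fun (acc : List String) p =>
        if !(known.contains p.1) then PySem.Set.add acc p.1
        else PySem.Set.update acc (PySem.Set.ofList (p.2.filter (fun t => !(known.contains t))))) u
      = PySem.Set.update u (l.flatMap (unkContrib known)) := by
  induction l generalizing u with
  | nil => rw [List.foldl_nil, List.flatMap_nil, PySem.Set.update_nil]
  | cons p ps ih =>
    rw [List.foldl_cons, List.flatMap_cons, PySem.Set.update_append, stepu_eq, ih]

-- every element of the stream is outside known
theorem stream_not_known (known : List String) (l : List (String × List String)) (x : String)
    (hx : x ∈ l.flatMap (unkContrib known)) : x ∉ known := by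
  rcases List.mem_flatMap.mp hx with ⟨p, _, hxp⟩
  unfold unkContrib at hxp
  cases h : known.contains p.1 with
  | false =>
    rw [if_neg (by simpa [List.contains_eq_mem] using h)] at hxp
    have hxe : x = p.1 := List.mem_singleton.mp hxp
    subst hxe
    simpa [List.contains_eq_mem] using h
  | true =>
    rw [if_pos (by simpa [List.contains_eq_mem] using h)] at hxp
    have := List.of_mem_filter hxp
    simpa [List.contains_eq_mem] using this

-- a non-known target of a known item is in the stream
theorem stream_mem_of_target (known : List String) (l : List (String × List String))
    (p : String × List String) (hp : p ∈ l) (hq : known.contains p.1 = true)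
    (t : String) (ht : t ∈ p.2) (htk : t ∉ known) :
    t ∈ l.flatMap (unkContrib known) := by
  refine List.mem_flatMap.mpr ⟨p, hp, ?_⟩
  unfold unkContrib
  rw [if_pos (by simpa [List.contains_eq_mem] using hq)]
  exact List.mem_filter.mpr ⟨ht, by simpa [List.contains_eq_mem] using htk⟩

-- ofList commutes with filter
theorem ofList_filter {α : Type} [BEq α] [LawfulBEq α] (P : α → Bool) (xs : List α) :
    PySem.Set.ofList (xs.filter P) = (PySem.Set.ofList xs).filter P := by
  induction xs using List.reverseRecOn with
  | nil => rfl
  | append_singleton xs x ih =>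
    cases hP : P x with
    | false =>
      have hfx : List.filter P [x] = [] := by simp [hP]
      rw [List.filter_append, hfx, List.append_nil, ih,
        PySem.Set.ofList_append_singleton, PySem.Set.add_eq_ite]
      split_ifs with hmem
      · rfl
      · rw [List.filter_append, hfx, List.append_nil]
    | true =>
      have hfx : List.filter P [x] = [x] := by simp [hP]
      rw [List.filter_append, hfx, PySem.Set.ofList_append_singleton,
        PySem.Set.ofList_append_singleton, ih, PySem.Set.add_eq_ite, PySem.Set.add_eq_ite]
      have hmemf : x ∈ List.filter P (PySem.Set.ofList xs) ↔ x ∈ PySem.Set.ofList xs :=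
        ⟨fun h => (List.mem_filter.mp h).1, fun h => List.mem_filter.mpr ⟨h, hP⟩⟩
      split_ifs with h1 h2 h2
      · rfl
      · exact absurd (hmemf.mp h1) h2
      · exact absurd (hmemf.mpr h2) h1
      · rw [List.filter_append, hfx]

-- the dict component of A's pair-fold ignores the unknown component
theorem fst_foldA (known : List String) (l : List (String × List String))
    (d : PySem.Dict String (List String)) (u : List String) :
    (l.foldl (fun (acc : (PySem.Dict String (List String)) × List String) p =>
      if !(known.contains p.1) then
        (acc.1, PySem.Set.add acc.2 p.1)
      else
        let kept := PySem.Set.ofList (p.2.filter (fun t => known.contains t))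
        let unknown := PySem.Set.update acc.2 (PySem.Set.ofList (p.2.filter (fun t => !(known.contains t))))
        let filtered := if kept ≠ [] then PySem.Dict.insert acc.1 p.1 kept else acc.1
        (filtered, unknown)) (d, u)).1
    = l.foldl (fun (f : PySem.Dict String (List String)) p =>
        if !(known.contains p.1) then f
        else
          let kept := PySem.Set.ofList (p.2.filter (fun t => known.contains t))
          if kept ≠ [] then PySem.Dict.insert f p.1 kept else f) d := by
  induction l generalizing d u with
  | nil => rfl
  | cons p ps ih =>
    simp only [List.foldl_cons]
    cases h : known.contains p.1 <;> simp only [Bool.not_true, Bool.not_false,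
      Bool.false_eq_true, if_true, if_false] <;> exact ih _ _

-- likewise the unknown component ignores the dict component
theorem snd_foldA (known : List String) (l : List (String × List String))
    (d : PySem.Dict String (List String)) (u : List String) :
    (l.foldl (fun (acc : (PySem.Dict String (List String)) × List String) p =>
      if !(known.contains p.1) then
        (acc.1, PySem.Set.add acc.2 p.1)
      else
        let kept := PySem.Set.ofList (p.2.filter (fun t => known.contains t))
        let unknown := PySem.Set.update acc.2 (PySem.Set.ofList (p.2.filter (fun t => !(known.contains t))))
        let filtered := if kept ≠ [] then PySem.Dict.insert acc.1 p.1 kept else acc.1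
        (filtered, unknown)) (d, u)).2
    = l.foldl (fun (acc : List String) p =>
        if !(known.contains p.1) then PySem.Set.add acc p.1
        else PySem.Set.update acc (PySem.Set.ofList (p.2.filter (fun t => !(known.contains t))))) u := by
  induction l generalizing d u with
  | nil => rfl
  | cons p ps ih =>
    simp only [List.foldl_cons]
    cases h : known.contains p.1 <;> simp only [Bool.not_true, Bool.not_false,
      Bool.false_eq_true, if_true, if_false] <;> exact ih _ _

-- for a known item of the mapping, B's set-difference kept equals A's comprehension kept
theorem kept_eq (known : List String) (mapping : List (String × List String))
    (p : String × List String) (hp : p ∈ mapping) (hq : known.contains p.1 = true) :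
    PySem.Set.diff (PySem.Set.ofList p.2) (PySem.Set.ofList (mapping.flatMap (unkContrib known)))
      = PySem.Set.ofList (p.2.filter (fun t => known.contains t)) := by
  rw [ofList_filter, PySem.Set.diff]
  apply List.filter_congr
  intro t ht
  have htp : t ∈ p.2 := (PySem.Set.mem_ofList _ _).mp ht
  by_cases hk : t ∈ known
  · have hns : t ∉ mapping.flatMap (unkContrib known) := fun hmem =>
      stream_not_known known mapping t hmem hk
    have h1 : (PySem.Set.ofList (mapping.flatMap (unkContrib known))).contains t = false := by
      rw [PySem.Set.contains_eq_listContains]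
      simpa [List.contains_eq_mem, PySem.Set.mem_ofList] using hns
    rw [h1]
    simpa [List.contains_eq_mem] using hk
  · have hms : t ∈ mapping.flatMap (unkContrib known) :=
      stream_mem_of_target known mapping p hp hq t htp hk
    have h1 : (PySem.Set.ofList (mapping.flatMap (unkContrib known))).contains t = true := by
      rw [PySem.Set.contains_eq_listContains]
      simpa [List.contains_eq_mem, PySem.Set.mem_ofList] using hms
    rw [h1]
    simpa [List.contains_eq_mem] using hk

-- ===== VERDICT (by name: the statement is the Claim_ definition above) =====
theorem filter_unknown_py_spec : Claim_equal_filter_unknown_py := by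
  intro mapping known _
  show _ = _
  unfold filter_unknown_py filter_unknown_py_alt
  have hstream : mapping.foldl (fun (s : List String) p =>
      if known.contains p.1 then s ++ p.2.filter (fun t => !(known.contains t))
      else s ++ [p.1]) []
      = mapping.flatMap (unkContrib known) := by
    have hfun : (fun (s : List String) (p : String × List String) =>
        if known.contains p.1 then s ++ p.2.filter (fun t => !(known.contains t))
        else s ++ [p.1]) = fun s p => s ++ unkContrib known p := by
      funext s p; unfold unkContrib; split_ifs <;> rfl
    rw [hfun, PySem.List.foldl_append_eq_flatMap, List.nil_append]
  refine Prod.ext ?_ ?_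
  · -- dict components
    show (_ : (PySem.Dict String (List String)) × List String).1.items = _
    rw [fst_foldA, hstream]
    congr 1
    apply PySem.List.foldl_congr_mem
    intro acc p hp
    cases h : known.contains p.1 with
    | false => rfl
    | true =>
      simp only [Bool.not_true, Bool.false_eq_true, if_false, if_true]
      rw [kept_eq known mapping p hp h]
  · -- unknown components
    show (_ : (PySem.Dict String (List String)) × List String).2 = _
    rw [snd_foldA, unkA_eq_update, hstream, PySem.Set.update_nil_left]
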